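-- pv_equiv track=rewrite | github.com/ilgon0110/codingtest_js | 백준/Gold/17140. 이차원 배열과 연산/이차원 배열과 연산.py | R_cal
-- ===== SOURCE A (Python) =====
-- def my_sort(arr):
--     my_dict = dict()
--     for num in arr:
--         if num != 0:
--             my_dict[num] = arr.count(num)
--     newArr = list(my_dict.items())
--     newArr.sort(key=lambda x : (x[1], x[0]))
--     result = []
--     for x,y in newArr:
--         result.append(x)
--         result.append(y)
--     return result
--
-- def R_cal(board):
--     newBoard = []
--
--     for i in range(len(board[0])):
--         tmp = []
--         for j in range(len(board)):
--             tmp.append(board[j][i])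
--         row = my_sort(tmp)
--         newBoard.append(row)
--
--     maxLen = 0
--     for i in range(len(newBoard)):
--         maxLen = max(len(newBoard[i]), maxLen)
--
--     for i in range(len(newBoard)):
--         while len(newBoard[i]) < maxLen:
--             newBoard[i].append(0)
--
--     N = len(newBoard[0])
--     M = len(newBoard)
--
--     if N >= 100:
--         N = 100
--     if M >= 100:
--         M = 100
--
--     result = [[0 for _ in range(M)] for _ in range(N)]
--     for i in range(M):
--         for j in range(N):
--             result[j][i] = newBoard[i][j]
--     return result
-- ===== SOURCE B (Python) =====
-- def _groups(s):
--     # s is sorted; return run-length pairs (count, value)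
--     pairs = []
--     n = len(s)
--     k = 0
--     while k < n:
--         j = k + 1
--         while j < n and s[j] == s[k]:
--             j += 1
--         pairs.append((j - k, s[k]))
--         k = j
--     return pairs
--
-- def R_cal(board):
--     cols = []
--     for i in range(len(board[0])):
--         s = sorted(row[i] for row in board if row[i] != 0)
--         pairs = _groups(s)
--         pairs.sort()
--         flat = []
--         for c, v in pairs:
--             flat.append(v)
--             flat.append(c)
--         cols.append(flat)
--     maxLen = 0
--     for r in cols:
--         maxLen = max(maxLen, len(r))
--     N = min(maxLen, 100)
--     M = min(len(cols), 100)
--     return [[cols[i][j] if j < len(cols[i]) else 0 for i in range(M)] for j in range(N)]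
-- ===== Notes on version B (the rewrite author's own statement) =====
-- stated objective: faster
-- what changed: Instead of A's dict keyed by value with arr.count(num) recomputed per element (quadratic per column), B sorts each column's nonzero values and run-length-encodes the runs into (count, value) pairs that Python's plain tuple sort orders; the pad-then-index-fill transpose is replaced by directly emitting the transposed rows with a comprehension that treats missing entries as 0.
import Mathlib
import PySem

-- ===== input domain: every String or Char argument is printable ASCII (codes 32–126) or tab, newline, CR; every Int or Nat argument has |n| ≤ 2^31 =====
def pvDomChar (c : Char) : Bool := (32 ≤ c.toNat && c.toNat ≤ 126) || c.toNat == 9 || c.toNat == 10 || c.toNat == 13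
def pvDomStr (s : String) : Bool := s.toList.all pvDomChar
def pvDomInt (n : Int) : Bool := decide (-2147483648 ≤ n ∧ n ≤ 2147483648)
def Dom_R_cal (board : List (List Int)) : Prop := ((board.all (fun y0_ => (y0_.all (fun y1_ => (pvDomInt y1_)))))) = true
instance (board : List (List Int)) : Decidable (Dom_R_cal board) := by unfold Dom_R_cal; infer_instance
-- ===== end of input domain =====

-- B replaces A's per-value arr.count dict counting by sorting each column and run-length
-- encoding the sorted runs, and fuses A's pad + index-fill transpose into one comprehension.

-- ===== PORT A =====
-- my_sort: dict of nonzero value -> arr.count(value), items sorted by (count, value), flattened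
def mySort (arr : List Int) : List Int :=
  let d := arr.foldl (fun d num =>
      if num ≠ 0 then d.insert num ((PySem.List.count arr num : Nat) : Int) else d)
    PySem.Dict.empty
  let newArr := PySem.List.sorted2 d.items (fun x => x.2) (fun x => x.1)
  newArr.foldl (fun r p => (r ++ [p.1]) ++ [p.2]) []

-- A's while-padding loop: append zeros until the row reaches maxLen
def padRow (row : List Int) (m : Nat) : List Int :=
  if row.length < m then padRow (row ++ [0]) m else row
termination_by m - row.length
decreasing_by simp_all; omega

def R_cal (board : List (List Int)) : List (List Int) :=
  -- board[0]: in-range under Pre_; getD transcribes the (guaranteed in-range) index access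
  let newBoard := (List.range (board.getD 0 []).length).foldl (fun nb i =>
      let tmp := (List.range board.length).foldl (fun t j => t ++ [(board.getD j []).getD i 0]) []
      nb ++ [mySort tmp]) []
  let maxLen := (List.range newBoard.length).foldl (fun m i => max (newBoard.getD i []).length m) 0
  let newBoard2 := newBoard.map (fun row => padRow row maxLen)
  let N := (newBoard2.getD 0 []).length
  let M := newBoard2.length
  let N' := if N ≥ 100 then 100 else N
  let M' := if M ≥ 100 then 100 else M
  let res0 := (List.range N').map (fun _ => (List.range M').map (fun _ => (0 : Int)))
  (List.range M').foldl (fun r i =>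
    (List.range N').foldl (fun r j =>
      r.set j ((r.getD j []).set i ((newBoard2.getD i []).getD j 0))) r) res0

-- ===== PORT B =====
-- _groups: outer while over k, inner while advancing j past the run of s[k]
def groupsGo (s : List Int) (k : Nat) : List (Int × Int) :=
  if _h : k < s.length then
    let v := s.getD k 0
    let j := k + 1 + ((s.drop (k + 1)).takeWhile (fun x => x == v)).length
    (((j - k : Nat) : Int), v) :: groupsGo s j
  else []
termination_by s.length - k
decreasing_by omega

def groupsB (s : List Int) : List (Int × Int) := groupsGo s 0

def R_cal_alt (board : List (List Int)) : List (List Int) :=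
  let cols := (List.range (board.getD 0 []).length).map (fun i =>
    let s := PySem.List.sorted ((board.map (fun row => row.getD i 0)).filter (fun v => decide (v ≠ 0))) (fun x => x)
    let ps := PySem.List.sorted2 (groupsB s) (fun p => p.1) (fun p => p.2)
    ps.foldl (fun r p => r ++ [p.2, p.1]) [])
  let maxLen := cols.foldl (fun m r => max m r.length) 0
  let N := min maxLen 100
  let M := min cols.length 100
  (List.range N).map (fun j => (List.range M).map (fun i =>
    let row := cols.getD i []
    if j < row.length then row.getD j 0 else 0))

-- ===== PRECONDITION & SPEC =====
-- Pre_ excludes exactly the boards on which Python A raises IndexError: an empty board,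
-- an empty first row, or a later row shorter than the first row (board[j][i] out of range).
def Pre_R_cal (board : List (List Int)) : Prop :=
  board ≠ [] ∧ (board.getD 0 []).length ≠ 0 ∧
    ∀ row ∈ board, (board.getD 0 []).length ≤ row.length
instance (board : List (List Int)) : Decidable (Pre_R_cal board) := by
  unfold Pre_R_cal; infer_instance

def pvWitness_R_cal : List (List Int) := [[1, 2, 1], [2, 1, 3], [1, 3, 3]]

def Spec_R_cal (board : List (List Int)) (out : List (List Int)) : Prop := out = R_cal_alt board
instance (board : List (List Int)) (out : List (List Int)) : Decidable (Spec_R_cal board out) := by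
  unfold Spec_R_cal; infer_instance

-- ===== CLAIM (what is proved, stated in full; the proofs are below) =====
def Claim_equal_R_cal : Prop := ∀ (board : List (List Int)), Dom_R_cal board → Pre_R_cal board → Spec_R_cal board (R_cal board)

-- ===== LEMMAS AND PROOFS =====

-- the two flatten loops agree
theorem flatten_eq (l : List (Int × Int)) (r : List Int) :
    l.foldl (fun r p => (r ++ [p.1]) ++ [p.2]) r = l.foldl (fun r p => r ++ [p.1, p.2]) r := by
  induction l generalizing r with
  | nil => rfl
  | cons p t ih =>
      simp only [List.foldl_cons]
      rw [show (r ++ [p.1]) ++ [p.2] = r ++ [p.1, p.2] by simp]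
      exact ih _

-- A's constant-value insert fold, characterised
theorem foldl_insert_const (c : Int → Int) (m : List Int) (S : List Int) (d : PySem.Dict Int Int)
    (hd : d.items = S.map (fun k => (k, c k))) :
    (m.foldl (fun d k => d.insert k (c k)) d).items = (PySem.Set.update S m).map (fun k => (k, c k)) := by
  induction m generalizing S d with
  | nil => simpa [PySem.Set.update] using hd
  | cons k t ih =>
      simp only [List.foldl_cons]
      have hkeys : d.keys = S := by
        simp [PySem.Dict.keys, hd, Function.comp_def]
      by_cases hc : d.contains k = true
      · have hmem : k ∈ S := by rwa [PySem.Dict.contains_iff_mem_keys, hkeys] at hc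
        have hitems : (d.insert k (c k)).items = S.map (fun k => (k, c k)) := by
          rw [PySem.Dict.items_insert, if_pos hc, hd, List.map_map]
          apply List.map_congr_left
          intro a _
          by_cases hak : (a == k) = true
          · simp only [Function.comp, hak, if_pos]
            have : a = k := by simpa using hak
            simp [this]
          · simp [Function.comp, hak]
        have := ih S (d.insert k (c k)) hitems
        rw [this]
        have h1 : PySem.Set.update S (k :: t) = PySem.Set.update (PySem.Set.add S k) t := by
          simp [PySem.Set.update]
        rw [h1]
        have h2 : PySem.Set.add S k = S := by simp [PySem.Set.add, PySem.Set.contains, hmem]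
        rw [h2]
      · have hnmem : k ∉ S := by
          intro hmem
          exact hc ((PySem.Dict.contains_iff_mem_keys d k).2 (hkeys ▸ hmem))
        have hitems : (d.insert k (c k)).items = (S ++ [k]).map (fun k => (k, c k)) := by
          rw [PySem.Dict.items_insert, if_neg hc, hd]; simp
        have := ih (S ++ [k]) (d.insert k (c k)) hitems
        rw [this]
        have h1 : PySem.Set.update S (k :: t) = PySem.Set.update (S ++ [k]) t := by
          simp [PySem.Set.update, PySem.Set.add, PySem.Set.contains, hnmem]
        rw [h1]

-- A's column list equals the direct map over rows
theorem tmp_eq (board : List (List Int)) (i : Nat) :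
    (List.range board.length).foldl (fun t j => t ++ [(board.getD j []).getD i 0]) []
      = board.map (fun row => row.getD i 0) := by
  rw [PySem.List.foldl_append_singleton_eq_map]
  simp only [List.nil_append]
  apply List.ext_getElem
  · simp
  · intro n h1 h2
    simp only [List.getElem_map, List.getElem_range]
    have hb : n < board.length := by simpa using h2
    rw [List.getD_eq_getElem board [] hb]

-- recursive reference form of B's run-length grouping loop
def grec : List Int → List (Int × Int)
  | [] => []
  | v :: rest =>
      ((((rest.takeWhile (fun x => x == v)).length + 1 : Nat) : Int), v)
        :: grec (rest.drop (rest.takeWhile (fun x => x == v)).length)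
termination_by s => s.length
decreasing_by
  have := (rest.takeWhile_sublist (fun x => x == v)).length_le
  simp only [List.length_drop, List.length_cons]
  omega

theorem grec_nil : grec [] = [] := by rw [grec]
theorem grec_cons (v : Int) (rest : List Int) :
    grec (v :: rest) = ((((rest.takeWhile (fun x => x == v)).length + 1 : Nat) : Int), v)
        :: grec (rest.drop (rest.takeWhile (fun x => x == v)).length) := by
  rw [grec]

theorem groupsGo_eq (s : List Int) (k : Nat) : groupsGo s k = grec (s.drop k) := by
  rw [groupsGo]
  split
  · rename_i h
    rw [List.drop_eq_getElem_cons h, grec_cons]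
    have hget : s.getD k 0 = s[k] := List.getD_eq_getElem s 0 h
    have hrec := groupsGo_eq s (k + 1 + ((s.drop (k + 1)).takeWhile (fun x => x == s.getD k 0)).length)
    simp only [hget] at hrec ⊢
    rw [hrec, List.drop_drop]
    congr 2
    omega
  · rw [List.drop_eq_nil_of_le (by omega), grec_nil]
termination_by s.length - k
decreasing_by omega

theorem drop_takeWhile_len (p : Int → Bool) (l : List Int) :
    l.drop (l.takeWhile p).length = l.dropWhile p := by
  induction l with
  | nil => rfl
  | cons a r ihr => by_cases h : p a <;> simp [h, ihr]

-- grec on a sorted list: snds strictly increasing, same membership, and each pair is (count, value)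
theorem grec_spec (s : List Int) (hs : s.Pairwise (· ≤ ·)) :
    ((grec s).map Prod.snd).Pairwise (· < ·)
    ∧ (∀ x : Int, x ∈ (grec s).map Prod.snd ↔ x ∈ s)
    ∧ (∀ p ∈ grec s, p = (((s.count p.2 : Nat) : Int), p.2)) := by
  induction s using grec.induct with
  | case1 => simp [grec_nil]
  | case2 v rest ih =>
      set w := rest.takeWhile (fun x => x == v) with hw
      set t := rest.drop w.length with ht
      have hwv : ∀ x ∈ w, x = v := by
        intro x hx
        simpa using List.mem_takeWhile_imp hx
      have htd : t = rest.dropWhile (fun x => x == v) := by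
        rw [ht, hw]; exact drop_takeWhile_len _ rest
      have hrest : rest = w ++ t := by rw [htd, hw]; exact (List.takeWhile_append_dropWhile).symm
      have hvle : ∀ x ∈ rest, v ≤ x := (List.pairwise_cons.1 hs).1
      have hrp : rest.Pairwise (· ≤ ·) := (List.pairwise_cons.1 hs).2
      have htp : t.Pairwise (· ≤ ·) := hrp.sublist (List.drop_sublist _ _)
      have hvt : ∀ x ∈ t, v < x := by
        intro x hx
        cases hcons : t with
        | nil => simp [hcons] at hx
        | cons h0 t' =>
            have hh0 : ¬ (h0 == v) = true := by
              have hne : rest.dropWhile (fun x => x == v) ≠ [] := by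
                rw [← htd, hcons]; simp
              have := List.head_dropWhile_not (fun x => x == v) hne
              rw [show (rest.dropWhile (fun x => x == v)).head hne = h0 from by
                simp [← htd, hcons]] at this
              simp [this]
            have hh0v : v < h0 := by
              have : v ≤ h0 := hvle h0 (by rw [hrest, hcons]; simp)
              have hne : h0 ≠ v := by simpa using hh0
              omega
            rw [hcons] at hx
            rcases List.mem_cons.1 hx with h | h
            · omega
            · have : h0 ≤ x := by
                have := (List.pairwise_cons.1 (hcons ▸ htp)).1
                exact this x h
              omega
      obtain ⟨ih1, ih2, ih3⟩ := ih htp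
      have hcnt_v : (v :: rest).count v = w.length + 1 := by
        rw [hrest]
        simp only [List.count_cons, List.count_append]
        have hwc : w.count v = w.length := by
          rw [List.count_eq_length.2 ?_]
          intro x hx; simp [hwv x hx]
        have htc : t.count v = 0 := by
          rw [List.count_eq_zero]
          intro hmem
          have := hvt v hmem
          omega
        simp [hwc, htc]
      have hcnt_t : ∀ x ∈ t, (v :: rest).count x = t.count x := by
        intro x hx
        have hxv : x ≠ v := by have := hvt x hx; omega
        rw [hrest]
        simp only [List.count_cons, List.count_append]
        have hwc : w.count x = 0 := by
          rw [List.count_eq_zero]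
          intro hmem
          exact hxv (hwv x hmem)
        simp [hwc, beq_iff_eq]
        omega
      rw [grec_cons]
      simp only [← hw]
      simp only [← ht]
      refine ⟨?_, ?_, ?_⟩
      · simp only [List.map_cons, List.pairwise_cons]
        refine ⟨?_, ih1⟩
        intro y hy
        have : y ∈ t := (ih2 y).1 hy
        exact hvt y this
      · intro x
        simp only [List.map_cons, List.mem_cons, ih2 x]
        constructor
        · rintro (h | h)
          · exact Or.inl h
          · exact Or.inr (by rw [hrest]; exact List.mem_append.2 (Or.inr h))
        · rintro (h | h)
          · exact Or.inl h
          · rw [hrest] at h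
            rcases List.mem_append.1 h with h | h
            · exact Or.inl (hwv x h)
            · exact Or.inr h
      · intro p hp
        rcases List.mem_cons.1 hp with h | h
        · rw [h]
          simp only
          rw [hcnt_v]
        · have := ih3 p h
          have hpt : p.2 ∈ t := by
            have : p.2 ∈ (grec t).map Prod.snd := List.mem_map.2 ⟨p, h, rfl⟩
            exact (ih2 p.2).1 this
          rw [this, hcnt_t p.2 hpt]

-- sorted2 is sorted with the lexicographic key
theorem sorted2_eq_sorted_lex {α : Type} (xs : List α) (k1 k2 : α → Int) :
    PySem.List.sorted2 xs k1 k2 = PySem.List.sorted xs (fun x => toLex (k1 x, k2 x)) := by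
  rw [PySem.List.sorted_eq_foldl_insertBy]
  show List.foldl (fun acc x => PySem.List.insertBy _ x acc) [] xs = _
  have hb : (fun a b => decide (k1 a < k1 b) || (!decide (k1 b < k1 a) && decide (k2 a < k2 b)))
      = (fun a b => decide (toLex (k1 a, k2 a) < toLex (k1 b, k2 b))) := by
    funext a b
    simp only [Prod.Lex.toLex_lt_toLex]
    by_cases h1 : k1 a < k1 b <;> by_cases h2 : k1 b < k1 a <;> by_cases h3 : k2 a < k2 b <;>
      simp [h1, h2, h3] <;> omega
  simp only [Bool.false_eq_true, if_false, hb]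

-- my_sort(column) equals B's sort + run-length + lexicographic-sort column
theorem column_eq (arr : List Int) :
    mySort arr =
      (PySem.List.sorted2
          (groupsB (PySem.List.sorted (arr.filter (fun v => decide (v ≠ 0))) (fun x => x)))
          (fun p => p.1) (fun p => p.2)).foldl (fun r p => r ++ [p.2, p.1]) [] := by
  set F := arr.filter (fun v => decide (v ≠ 0)) with hF
  set s := PySem.List.sorted F (fun x => x) with hsdef
  have hs : s.Pairwise (· ≤ ·) := PySem.List.sorted_pairwise F _
  have hsp : s.Perm F := PySem.List.sorted_perm F _ false
  have hgB : groupsB s = grec s := by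
    rw [groupsB, groupsGo_eq]; rfl
  obtain ⟨hg1, hg2, hg3⟩ := grec_spec s hs
  set G := grec s with hGdef
  set D := G.map Prod.snd with hDdef
  set E := PySem.Set.ofList F with hEdef
  -- characterise A's dict items
  have hitems : (arr.foldl (fun d num =>
      if num ≠ 0 then d.insert num ((PySem.List.count arr num : Nat) : Int) else d)
      (PySem.Dict.empty : PySem.Dict Int Int)).items
      = E.map (fun k => (k, ((PySem.List.count arr k : Nat) : Int))) := by
    rw [PySem.List.foldl_ite_eq_foldl_filter (fun v => v ≠ 0)
      (fun (d : PySem.Dict Int Int) (num : Int) => d.insert num ((PySem.List.count arr num : Nat) : Int)) arr _]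
    rw [foldl_insert_const (fun k => ((PySem.List.count arr k : Nat) : Int)) _ [] _ (by rfl)]
    rw [hEdef, PySem.Set.ofList_eq_foldl]
    rfl
  -- counts agree on D
  have hcount : ∀ v ∈ D, ((s.count v : Nat) : Int) = ((PySem.List.count arr v : Nat) : Int) := by
    intro v hv
    have hvs : v ∈ s := (hg2 v).1 hv
    have hvF : v ∈ F := hsp.mem_iff.1 hvs
    have hvne : v ≠ 0 := by
      rw [hF] at hvF; simpa using (List.mem_filter.1 hvF).2
    have h1 : s.count v = F.count v := hsp.count_eq v
    have h2 : F.count v = arr.count v := by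
      rw [hF]; exact List.count_filter (by simpa using hvne)
    have h3 : PySem.List.count arr v = List.count v arr := by simp [PySem.List.count]
    rw [h1, h2, h3]
  -- G as a map over D
  have hGmap : G = D.map (fun v => (((s.count v : Nat) : Int), v)) := by
    rw [hDdef, List.map_map]
    conv_lhs => rw [show G = G.map id from (List.map_id G).symm]
    apply List.map_congr_left
    intro p hp
    have := hg3 p hp
    simp [Function.comp]
    exact this
  have hDnodup : D.Nodup := hg1.imp ne_of_lt
  have hGnodup : G.Nodup := by
    rw [hGmap]
    exact hDnodup.map (fun a b h => congrArg Prod.snd h)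
  -- the sorted pair lists
  set S := PySem.List.sorted G (fun p => toLex (p.1, p.2)) with hSdef
  have hSperm : S.Perm G := PySem.List.sorted_perm G _ false
  have hSnodup : S.Nodup := hSperm.symm.nodup hGnodup
  have hSle : S.Pairwise (fun a b => (toLex (a.1, a.2) : Lex (Int × Int)) ≤ toLex (b.1, b.2)) :=
    PySem.List.sorted_pairwise G _
  have hSlt : S.Pairwise (fun a b => (toLex (a.1, a.2) : Lex (Int × Int)) < toLex (b.1, b.2)) := by
    have := List.Pairwise.and hSle hSnodup
    apply this.imp
    rintro a b ⟨h1, h2⟩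
    refine lt_of_le_of_ne h1 (fun heq => h2 ?_)
    have := toLex.injective heq
    exact Prod.ext (congrArg Prod.fst this) (congrArg Prod.snd this)
  -- swap-perm to A's items
  have hswap : (S.map Prod.swap).Perm (E.map (fun k => (k, ((PySem.List.count arr k : Nat) : Int)))) := by
    have h1 : (S.map Prod.swap).Perm (G.map Prod.swap) := hSperm.map Prod.swap
    have h2 : G.map Prod.swap = D.map (fun v => (v, ((PySem.List.count arr v : Nat) : Int))) := by
      conv_lhs => rw [hGmap]
      rw [List.map_map]
      apply List.map_congr_left
      intro v hv
      simp [Function.comp, Prod.swap]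
      exact (by exact_mod_cast hcount v hv)
    have h3 : D.Perm E := by
      refine (List.perm_ext_iff_of_nodup hDnodup (PySem.Set.nodup_ofList F)).2 ?_
      intro x
      rw [hg2 x, hsp.mem_iff, PySem.Set.mem_ofList]
    exact h1.trans (h2 ▸ h3.map _)
  -- A's sorted list equals S with its pairs swapped
  have hmain : PySem.List.sorted (E.map (fun k => (k, ((PySem.List.count arr k : Nat) : Int))))
      (fun x => toLex (x.2, x.1)) = S.map Prod.swap := by
    apply PySem.List.sorted_eq_of_perm_of_pairwise_lt _ _ _ hswap
    rw [List.pairwise_map]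
    apply hSlt.imp
    intro a b h
    simpa [Prod.swap] using h
  -- assemble
  show (PySem.List.sorted2 (arr.foldl (fun d num =>
      if num ≠ 0 then d.insert num ((PySem.List.count arr num : Nat) : Int) else d)
      (PySem.Dict.empty : PySem.Dict Int Int)).items (fun x => x.2) (fun x => x.1)).foldl
      (fun r p => (r ++ [p.1]) ++ [p.2]) [] = _
  rw [flatten_eq, hitems, sorted2_eq_sorted_lex, hmain, hgB]
  rw [sorted2_eq_sorted_lex]
  rw [List.foldl_map]
  rfl

-- padRow is append-zeros
theorem padRow_eq (row : List Int) (m : Nat) :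
    padRow row m = row ++ List.replicate (m - row.length) 0 := by
  by_cases h : row.length < m
  · rw [padRow, if_pos h, padRow_eq (row ++ [0]) m]
    simp only [List.append_assoc]
    congr 1
    have : m - row.length = (m - (row.length + 1)) + 1 := by omega
    rw [this, List.replicate_succ]
    simp
  · rw [padRow, if_neg h]
    have : m - row.length = 0 := by omega
    simp [this]
termination_by m - row.length
decreasing_by simp_all; omega

theorem padRow_length (row : List Int) (m : Nat) (h : row.length ≤ m) :
    (padRow row m).length = m := by
  rw [padRow_eq]; simp; omega

theorem padRow_getD (row : List Int) (m j : Nat) :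
    (padRow row m).getD j 0 = if j < row.length then row.getD j 0 else 0 := by
  rw [padRow_eq]
  by_cases h : j < row.length
  · rw [if_pos h, List.getD_append _ _ _ _ h]
  · rw [if_neg h]
    by_cases h2 : j < row.length + (m - row.length)
    · rw [List.getD_eq_getElem _ _ (by simpa using h2)]
      rw [List.getElem_append_right (by omega)]
      simp
    · rw [List.getD_eq_default]
      simp; omega

-- the getD-characterisation of a row-set fill: row built by setting every index once
theorem fill_row (M : Nat) (w : Nat → Int) (m : Nat) (hm : m ≤ M) :
    (List.range m).foldl (fun row i => row.set i (w i)) (List.replicate M (0 : Int))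
      = (List.range m).map w ++ List.replicate (M - m) 0 := by
  induction m with
  | zero => simp
  | succ n ih =>
      have hn : n ≤ M := by omega
      rw [List.range_succ, List.foldl_append, ih hn]
      simp only [List.foldl_cons, List.foldl_nil, List.map_append, List.map_cons, List.map_nil]
      have hset : ((List.range n).map w ++ List.replicate (M - n) 0).set n (w n)
          = (List.range n).map w ++ (List.replicate (M - n) 0).set 0 (w n) := by
        rw [List.set_append_right _ _ (by simp)]
        simp
      rw [hset]
      have : M - n = (M - (n + 1)) + 1 := by omega
      rw [this, List.replicate_succ, List.set_cons_zero]
      simp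

-- inner j-loop: sets element i of every row j < N (with N = r.length it maps all rows)
theorem fill_inner (N : Nat) (i : Nat) (v : Nat → Int) (r : List (List Int)) (_hNr : N ≤ r.length) (n : Nat) (hn : n ≤ N) :
    (List.range n).foldl (fun r j => r.set j ((r.getD j []).set i (v j))) r
      = (List.range r.length).map (fun j => if j < n then (r.getD j []).set i (v j) else r.getD j []) := by
  induction n with
  | zero =>
      simp only [List.range_zero, List.foldl_nil]
      apply List.ext_getElem
      · simp
      · intro k h1 h2
        simp only [List.getElem_map, List.getElem_range]
        rw [List.getD_eq_getElem _ _ (by simpa using h2)]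
        simp
  | succ m ih =>
      have hm : m ≤ N := by omega
      rw [List.range_succ, List.foldl_append, ih hm]
      simp only [List.foldl_cons, List.foldl_nil]
      apply List.ext_getElem
      · simp
      · intro k h1 h2
        simp only [List.length_map, List.length_range] at h1 h2 ⊢
        have hgetD : ∀ (q : Nat), q < r.length →
            ((List.range r.length).map (fun j => if j < m then (r.getD j []).set i (v j) else r.getD j [])).getD q []
              = if q < m then (r.getD q []).set i (v q) else r.getD q [] := by
          intro q hq
          exact PySem.List.getD_map_range _ _ _ _ hq
        by_cases hk : k = m
        · subst hk
          rw [List.getElem_set_self (by simpa using h1)]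
          · rw [hgetD k (by omega)]
            simp
        · rw [List.getElem_set_ne (by omega)]
          simp only [List.getElem_map, List.getElem_range]
          by_cases hkm : k < m
          · simp [hkm, show k < m + 1 by omega]
          · simp [hkm, show ¬ k < m + 1 by omega]

-- outer i-loop decomposed row-wise
theorem fill_outer (N : Nat) (v : Nat → Nat → Int) (is : List Nat) (r : List (List Int)) (hr : r.length = N) :
    is.foldl (fun r i => (List.range N).foldl (fun r j => r.set j ((r.getD j []).set i (v i j))) r) r
      = (List.range N).map (fun j => is.foldl (fun row i => row.set i (v i j)) (r.getD j [])) := by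
  induction is generalizing r with
  | nil =>
      simp only [List.foldl_nil]
      apply List.ext_getElem
      · simp [hr]
      · intro k h1 h2
        simp only [List.getElem_map, List.getElem_range]
        rw [List.getD_eq_getElem _ _ (by omega)]
  | cons i t ih =>
      simp only [List.foldl_cons]
      rw [fill_inner N i (fun j => v i j) r (by omega) N (le_refl N)]
      rw [ih _ (by simp [hr])]
      apply List.ext_getElem
      · simp
      · intro k h1 h2
        simp only [List.length_map, List.length_range] at h1 h2
        simp only [List.getElem_map, List.getElem_range]
        congr 1
        rw [hr]
        rw [PySem.List.getD_map_range _ _ _ _ (by omega)]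
        simp [show k < N from by omega, hr]

theorem getD_map_lt {α β : Type} (l : List α) (f : α → β) (i : Nat) (d : α) (d' : β) (h : i < l.length) :
    (l.map f).getD i d' = f (l.getD i d) := by
  rw [List.getD_eq_getElem _ _ (by simpa using h), List.getElem_map, List.getD_eq_getElem _ _ h]

-- A's maxLen loop equals B's
theorem foldl_max_comm (l : List Nat) (f : Nat → Nat) (init : Nat) :
    l.foldl (fun m x => max (f x) m) init = l.foldl (fun m x => max m (f x)) init := by
  induction l generalizing init with
  | nil => rfl
  | cons a t ih =>
      simp only [List.foldl_cons]
      rw [Nat.max_comm (f a) init]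
      exact ih _

theorem maxLen_eq (nb : List (List Int)) :
    (List.range nb.length).foldl (fun m i => max (nb.getD i []).length m) 0
      = nb.foldl (fun m r => max m r.length) 0 := by
  rw [foldl_max_comm (List.range nb.length) (fun i => (nb.getD i []).length) 0]
  have h2 : (List.range nb.length).foldl (fun m i => max m (nb.getD i []).length) 0
      = ((List.range nb.length).map (fun i => nb.getD i [])).foldl (fun m r => max m r.length) 0 := by
    rw [List.foldl_map]
  rw [h2]
  congr 1
  apply List.ext_getElem
  · simp
  · intro k h1' h2'
    simp only [List.getElem_map, List.getElem_range]
    exact List.getD_eq_getElem nb [] (by simpa using h2')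

-- ===== VERDICT (by name: the statement is the Claim_ definition above) =====
theorem R_cal_spec : Claim_equal_R_cal := by
  intro board _ hpre
  obtain ⟨hne, hlen0, hrows⟩ := hpre
  unfold Spec_R_cal
  simp only [R_cal, R_cal_alt]
  rw [PySem.List.foldl_append_singleton_eq_map]
  simp only [List.nil_append, tmp_eq, column_eq]
  rw [maxLen_eq]
  set P := (List.range (board.getD 0 []).length).map (fun i =>
      List.foldl (fun r p => r ++ [p.2, p.1]) []
        (PySem.List.sorted2
          (groupsB (PySem.List.sorted
            ((board.map (fun row => row.getD i 0)).filter (fun v => decide (v ≠ 0))) (fun x => x)))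
          (fun p => p.1) (fun p => p.2))) with hPdef
  set ML := P.foldl (fun m r => max m r.length) 0 with hMLdef
  set NB2 := P.map (fun row => padRow row ML) with hNB2def
  have hPlen : P.length = (board.getD 0 []).length := by
    rw [hPdef]; simp
  have hP0 : 0 < P.length := by omega
  have hmax : ∀ r ∈ P, r.length ≤ ML := by
    intro r hr
    exact (PySem.List.le_foldl_max_nat P List.length 0).2 r hr
  have hNB2len : NB2.length = P.length := by rw [hNB2def]; simp
  have hPmem : ∀ i, i < P.length → P.getD i [] ∈ P := by
    intro i hi
    rw [List.getD_eq_getElem P [] hi]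
    exact List.getElem_mem _
  have hN : (NB2.getD 0 []).length = ML := by
    rw [hNB2def, getD_map_lt P _ 0 [] [] hP0]
    exact padRow_length _ _ (hmax _ (hPmem 0 hP0))
  rw [hN, hNB2len]
  have hifN : (if ML ≥ 100 then 100 else ML) = min ML 100 := by split_ifs <;> omega
  have hifM : (if P.length ≥ 100 then 100 else P.length) = min P.length 100 := by split_ifs <;> omega
  rw [hifN, hifM]
  rw [fill_outer (min ML 100) (fun i j => (NB2.getD i []).getD j 0) (List.range (min P.length 100))
      ((List.range (min ML 100)).map (fun _ => (List.range (min P.length 100)).map (fun _ => (0 : Int))))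
      (by simp)]
  apply List.ext_getElem
  · simp
  · intro j hj1 hj2
    simp only [List.getElem_map, List.getElem_range]
    rw [PySem.List.getD_map_range _ _ _ _ (by simpa using hj1)]
    have hconst : (List.range (min P.length 100)).map (fun _ => (0 : Int))
        = List.replicate (min P.length 100) 0 := by
      rw [List.map_const']; simp
    rw [hconst]
    rw [fill_row (min P.length 100) (fun i => (NB2.getD i []).getD j 0)
        (min P.length 100) (le_refl _)]
    simp only [Nat.sub_self, List.replicate_zero, List.append_nil]
    apply List.ext_getElem
    · simp
    · intro i hi1 hi2
      simp only [List.getElem_map, List.getElem_range]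
      have hiP : i < P.length := by simp at hi1; omega
      have hNB2i : NB2.getD i [] = padRow (P.getD i []) ML := by
        rw [hNB2def, getD_map_lt P _ i [] [] hiP]
      rw [hNB2i, padRow_getD]
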